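-- pv_equiv track=rewrite | github.com/redietamare/Customer-Experience-Analytics-for-Fintech-Apps-Week-2 | analyze_reviews.py | assign_theme
-- ===== SOURCE A (Python) =====
-- def assign_theme(review_text, theme_keywords_map):
--     themes = []
--     text_lower = str(review_text).lower() # Ensure string and lowercase
--     for theme, keywords in theme_keywords_map.items():
--         for keyword in keywords:
--             if keyword in text_lower:
--                 themes.append(theme)
--                 break # Assign theme if any keyword is found
--     return ", ".join(themes) if themes else "Other"
-- ===== SOURCE B (Python) =====
-- def assign_theme(review_text, theme_keywords_map):
--     text_lower = str(review_text).lower()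
--     # Phase 1: substring-test each distinct keyword once, recording the matched ones.
--     distinct = set()
--     for kws in theme_keywords_map.values():
--         distinct.update(kws)
--     matched = {k for k in distinct if k in text_lower}
--     # Phase 2: a theme applies iff one of its keywords was matched.
--     themes = [theme for theme, kws in theme_keywords_map.items()
--               if not matched.isdisjoint(kws)]
--     return ", ".join(themes) if themes else "Other"
-- ===== Notes on version B (the rewrite author's own statement) =====
-- stated objective: alternative
-- what changed: B splits the work into two phases: it first scans all keywords once, building the set of keywords that occur in the text, and then selects themes by set membership of their keywords, instead of A's nested loop that substring-tests each theme's keywords with an early break.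
import Mathlib
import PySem

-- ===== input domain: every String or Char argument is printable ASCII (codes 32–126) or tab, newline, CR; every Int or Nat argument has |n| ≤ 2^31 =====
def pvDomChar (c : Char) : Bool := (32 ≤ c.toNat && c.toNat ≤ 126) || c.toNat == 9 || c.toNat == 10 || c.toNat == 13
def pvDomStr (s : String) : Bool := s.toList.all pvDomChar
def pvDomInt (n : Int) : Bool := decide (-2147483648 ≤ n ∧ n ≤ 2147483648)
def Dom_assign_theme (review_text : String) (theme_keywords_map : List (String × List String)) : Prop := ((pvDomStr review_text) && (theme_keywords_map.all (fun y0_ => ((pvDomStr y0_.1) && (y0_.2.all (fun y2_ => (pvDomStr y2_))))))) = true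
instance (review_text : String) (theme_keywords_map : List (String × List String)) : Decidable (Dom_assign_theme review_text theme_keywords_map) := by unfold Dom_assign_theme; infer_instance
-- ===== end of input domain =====

-- B replaces A's nested substring-testing loop with two phases: build the set of matched
-- keywords in one pass, then select themes by set membership (objective: alternative).

-- ===== PORT A =====
-- inner 'for keyword in keywords: if keyword in text_lower: themes.append(theme); break'
def assign_theme_loopKw (tl theme : String) (acc : List String) : List String → List String
  | [] => acc
  | k :: rest =>
      if PySem.Str.isIn k tl then acc ++ [theme]
      else assign_theme_loopKw tl theme acc rest

def assign_theme (review_text : String) (theme_keywords_map : List (String × List String)) : String :=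
  let text_lower := PySem.Str.lower review_text
  let themes := theme_keywords_map.foldl
    (fun acc p => assign_theme_loopKw text_lower p.1 acc p.2) []
  if themes = [] then "Other" else PySem.Str.join ", " themes

-- ===== PORT B =====
def assign_theme_alt (review_text : String) (theme_keywords_map : List (String × List String)) : String :=
  let text_lower := PySem.Str.lower review_text
  -- distinct = set(); for kws in values(): distinct.update(kws)
  let distinct : PySem.Set String :=
    theme_keywords_map.foldl (fun s p => PySem.Set.update s p.2) PySem.Set.empty
  -- matched = {k for k in distinct if k in text_lower}
  let matched : PySem.Set String :=
    distinct.filter (fun k => PySem.Str.isIn k text_lower)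
  let themes := (theme_keywords_map.filter
      (fun p => !(PySem.Set.isdisjoint matched p.2))).map Prod.fst
  if themes = [] then "Other" else PySem.Str.join ", " themes

-- ===== PRECONDITION & SPEC =====
def Spec_assign_theme (review_text : String) (theme_keywords_map : List (String × List String)) (out : String) : Prop := out = assign_theme_alt review_text theme_keywords_map
instance (review_text : String) (theme_keywords_map : List (String × List String)) (out : String) : Decidable (Spec_assign_theme review_text theme_keywords_map out) := by unfold Spec_assign_theme; infer_instance

-- ===== CLAIM (what is proved, stated in full; the proofs are below) =====
def Claim_equal_assign_theme : Prop := ∀ (review_text : String) (theme_keywords_map : List (String × List String)), Dom_assign_theme review_text theme_keywords_map → Spec_assign_theme review_text theme_keywords_map (assign_theme review_text theme_keywords_map)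

-- ===== LEMMAS AND PROOFS =====

-- A's inner loop-with-break is 'append iff some keyword matches'.
theorem loopKw_eq_any (tl theme : String) (acc : List String) (kws : List String) :
    assign_theme_loopKw tl theme acc kws =
      if kws.any (fun k => PySem.Str.isIn k tl) then acc ++ [theme] else acc := by
  induction kws with
  | nil => simp [assign_theme_loopKw]
  | cons k rest ih =>
      simp only [assign_theme_loopKw, List.any_cons, Bool.or_eq_true]
      by_cases h : PySem.Str.isIn k tl = true
      · rw [if_pos h, if_pos (Or.inl h)]
      · rw [if_neg h, ih]
        by_cases h2 : rest.any (fun k => PySem.Str.isIn k tl) = true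
        · rw [if_pos h2, if_pos (Or.inr h2)]
        · rw [if_neg h2, if_neg (by tauto)]

-- membership in B's distinct-keyword set
theorem mem_distinct (m : List (String × List String)) (init : PySem.Set String) (x : String) :
    x ∈ m.foldl (fun s p => PySem.Set.update s p.2) init ↔ x ∈ init ∨ ∃ p ∈ m, x ∈ p.2 := by
  induction m generalizing init with
  | nil => simp
  | cons p rest ih =>
      rw [List.foldl_cons, ih, PySem.Set.mem_update]
      simp only [List.mem_cons]
      constructor
      · rintro ((h | h) | ⟨q, hq, hx⟩)
        · exact Or.inl h
        · exact Or.inr ⟨p, Or.inl rfl, h⟩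
        · exact Or.inr ⟨q, Or.inr hq, hx⟩
      · rintro (h | ⟨q, (rfl | hq), hx⟩)
        · exact Or.inl (Or.inl h)
        · exact Or.inl (Or.inr hx)
        · exact Or.inr ⟨q, hq, hx⟩

-- for a theme of the map, B's disjointness test agrees with A's substring test
theorem not_disjoint_matched (tl : String) (m : List (String × List String))
    (p : String × List String) (hp : p ∈ m) :
    (!(PySem.Set.isdisjoint
        ((m.foldl (fun s q => PySem.Set.update s q.2) PySem.Set.empty).filter
          (fun k => PySem.Str.isIn k tl)) p.2))
      = p.2.any (fun k => PySem.Str.isIn k tl) := by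
  by_cases h : p.2.any (fun k => PySem.Str.isIn k tl) = true
  · rw [h]
    rcases List.any_eq_true.mp h with ⟨k, hk, hik⟩
    simp only [Bool.not_eq_true']
    rw [Bool.eq_false_iff]
    intro hd
    have := (PySem.Set.isdisjoint_iff _ _).mp hd k ?_
    · exact this hk
    · rw [List.mem_filter]
      exact ⟨(mem_distinct m _ k).mpr (Or.inr ⟨p, hp, hk⟩), hik⟩
  · rw [Bool.not_eq_true] at h
    rw [h, Bool.not_eq_false', (PySem.Set.isdisjoint_iff _ _)]
    intro k hk hkp
    rw [List.mem_filter] at hk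
    have : k ∈ p.2 → PySem.Str.isIn k tl = false := by
      intro hm
      exact Bool.eq_false_iff.mpr (List.any_eq_false.mp h k hm)
    rw [this hkp] at hk
    exact Bool.false_ne_true hk.2

-- A's fold over the map equals B's filter-then-map, given pointwise agreement of the tests
theorem fold_eq_filter_map (tl : String) (q : String × List String → Bool)
    (m : List (String × List String)) (acc : List String)
    (hq : ∀ p ∈ m, p.2.any (fun k => PySem.Str.isIn k tl) = q p) :
    m.foldl (fun acc p => assign_theme_loopKw tl p.1 acc p.2) acc
      = acc ++ (m.filter q).map Prod.fst := by
  induction m generalizing acc with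
  | nil => simp
  | cons p rest ih =>
      rw [List.foldl_cons, loopKw_eq_any, hq p List.mem_cons_self, List.filter_cons]
      by_cases h : q p = true
      · rw [if_pos h, if_pos h, ih _ (fun x hx => hq x (List.mem_cons_of_mem _ hx)),
          List.map_cons]
        simp
      · rw [if_neg h, if_neg h]
        exact ih _ (fun x hx => hq x (List.mem_cons_of_mem _ hx))

-- ===== VERDICT (by name: the statement is the Claim_ definition above) =====
theorem assign_theme_spec : Claim_equal_assign_theme := by
  intro review_text m _
  unfold Spec_assign_theme assign_theme assign_theme_alt
  simp only []
  rw [fold_eq_filter_map (PySem.Str.lower review_text)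
      (fun p => !(PySem.Set.isdisjoint
        ((m.foldl (fun s q => PySem.Set.update s q.2) PySem.Set.empty).filter
          (fun k => PySem.Str.isIn k (PySem.Str.lower review_text))) p.2)) m []
      (fun p hp => (not_disjoint_matched (PySem.Str.lower review_text) m p hp).symm)]
  simp
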